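-- pv_equiv track=rewrite | github.com/BillBrieferServer/ces-api | routers/official_import.py | _guess_mapping
-- ===== SOURCE A (Python) =====
-- GUESS_PATTERNS = {
--     "jurisdiction_name": ["jurisdiction", "entity", "city", "county", "district", "agency"],
--     "name": ["name", "official", "person", "full name"],
--     "title": ["title", "position", "role", "office"],
--     "email": ["email", "e-mail", "mail"],
--     "phone": ["phone", "telephone", "tel"],
--     "fax": ["fax"],
--     "mailing_address": ["mailing", "mail address", "po box"],
--     "physical_address": ["physical", "street", "address"],
--     "source": ["source"],
--     "role_type": ["role type", "elected", "staff"],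
-- }
--
-- def _guess_mapping(headers):
--     mapping = {}
--     used = set()
--     for field, pats in GUESS_PATTERNS.items():
--         best = None
--         for h in headers:
--             if h in used or not h:
--                 continue
--             hl = h.lower().strip()
--             if any(p == hl for p in pats):
--                 best = h
--                 break
--         if not best:
--             for h in headers:
--                 if h in used or not h:
--                     continue
--                 hl = h.lower().strip()
--                 if any(p in hl for p in pats):
--                     best = h
--                     break
--         if best:
--             mapping[field] = best
--             used.add(best)
--     return mapping
-- ===== SOURCE B (Python) =====
-- GUESS_PATTERNS = {
--     "jurisdiction_name": ["jurisdiction", "entity", "city", "county", "district", "agency"],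
--     "name": ["name", "official", "person", "full name"],
--     "title": ["title", "position", "role", "office"],
--     "email": ["email", "e-mail", "mail"],
--     "phone": ["phone", "telephone", "tel"],
--     "fax": ["fax"],
--     "mailing_address": ["mailing", "mail address", "po box"],
--     "physical_address": ["physical", "street", "address"],
--     "source": ["source"],
--     "role_type": ["role type", "elected", "staff"],
-- }
--
--
-- def _guess_mapping(headers):
--     # Normalize every header once, up front (A re-normalizes per field and per scan).
--     norm = [h.lower().strip() for h in headers]
--     mapping = {}
--     used = set()
--     for field, pats in GUESS_PATTERNS.items():
--         # Score every still-available matching header (exact pattern match = 0,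
--         # substring match = 1) and take the argmin by (score, position): an exact
--         # match anywhere beats any substring match, ties go to the earliest header.
--         cands = [((0 if hl in pats else 1), i, h)
--                  for i, (h, hl) in enumerate(zip(headers, norm))
--                  if h and h not in used and any(p in hl for p in pats)]
--         if cands:
--             best = min(cands, key=lambda c: (c[0], c[1]))[2]
--             mapping[field] = best
--             used.add(best)
--     return mapping
-- ===== Notes on version B (the rewrite author's own statement) =====
-- stated objective: faster
-- what changed: B normalizes all headers once up front and, per field, builds a scored candidate list (exact match=0, substring match=1, with position) in one comprehension and picks the argmin by (score, position), replacing A's two sequential scans per field each of which re-normalizes every header.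
import Mathlib
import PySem

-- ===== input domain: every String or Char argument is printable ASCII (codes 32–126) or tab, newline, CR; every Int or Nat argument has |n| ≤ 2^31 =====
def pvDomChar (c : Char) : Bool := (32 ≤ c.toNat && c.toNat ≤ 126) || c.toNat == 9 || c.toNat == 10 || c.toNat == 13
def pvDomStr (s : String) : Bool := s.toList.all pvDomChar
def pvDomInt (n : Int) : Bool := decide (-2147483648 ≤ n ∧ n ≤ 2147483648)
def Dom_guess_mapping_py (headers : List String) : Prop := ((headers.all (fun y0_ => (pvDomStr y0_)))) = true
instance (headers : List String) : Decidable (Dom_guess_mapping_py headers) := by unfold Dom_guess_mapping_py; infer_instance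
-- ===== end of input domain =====

-- B normalizes headers once and, per field, scores all matching headers (exact=0, substring=1)
-- and takes the argmin by (score, position), instead of A's two sequential scans; same cost class.

-- ===== PORT A =====
def pvGuessPatterns : List (String × List String) :=
  [("jurisdiction_name", ["jurisdiction", "entity", "city", "county", "district", "agency"]),
   ("name", ["name", "official", "person", "full name"]),
   ("title", ["title", "position", "role", "office"]),
   ("email", ["email", "e-mail", "mail"]),
   ("phone", ["phone", "telephone", "tel"]),
   ("fax", ["fax"]),
   ("mailing_address", ["mailing", "mail address", "po box"]),
   ("physical_address", ["physical", "street", "address"]),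
   ("source", ["source"]),
   ("role_type", ["role type", "elected", "staff"])]

-- A's first loop: first unused non-empty header whose lowered-stripped value EQUALS a pattern
def pvAScanExact (used : PySem.Set String) (pats : List String) : List String → Option String
  | [] => none
  | h :: t =>
    if PySem.Set.contains used h || h == "" then pvAScanExact used pats t
    else
      let hl := PySem.Str.strip (PySem.Str.lower h)
      if pats.any (fun p => p == hl) then some h else pvAScanExact used pats t

-- A's second loop: first unused non-empty header whose lowered-stripped value CONTAINS a pattern
def pvAScanSub (used : PySem.Set String) (pats : List String) : List String → Option String
  | [] => none
  | h :: t =>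
    if PySem.Set.contains used h || h == "" then pvAScanSub used pats t
    else
      let hl := PySem.Str.strip (PySem.Str.lower h)
      if pats.any (fun p => PySem.Str.isIn p hl) then some h else pvAScanSub used pats t

def pvAStep (headers : List String)
    (st : PySem.Dict String String × PySem.Set String) (fp : String × List String) :
    PySem.Dict String String × PySem.Set String :=
  let best :=
    match pvAScanExact st.2 fp.2 headers with
    | some b => some b
    | none => pvAScanSub st.2 fp.2 headers
  match best with
  | some b => (st.1.insert fp.1 b, PySem.Set.add st.2 b)
  | none => st

def guess_mapping_py (headers : List String) : List (String × String) :=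
  (pvGuessPatterns.foldl (pvAStep headers) (PySem.Dict.empty, PySem.Set.empty)).1.items

-- ===== PORT B =====
-- B's candidate list for one field: every available header that matches at all,
-- scored 0 (its normalized value IS a pattern) or 1 (it merely contains one), with its position.
def pvBCands (used : PySem.Set String) (pats : List String)
    (headers norm : List String) : List (Int × Int × String) :=
  ((PySem.List.enumerate (headers.zip norm)).filter
      (fun e => !(e.2.1 == "") && !(PySem.Set.contains used e.2.1)
        && pats.any (fun p => PySem.Str.isIn p e.2.2))).map
    (fun e => ((if pats.contains e.2.2 then (0 : Int) else 1), e.1, e.2.1))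

def pvBStep (headers norm : List String)
    (st : PySem.Dict String String × PySem.Set String) (fp : String × List String) :
    PySem.Dict String String × PySem.Set String :=
  match PySem.List.min2? (pvBCands st.2 fp.2 headers norm) (·.1) (·.2.1) with
  | some c => (st.1.insert fp.1 c.2.2, PySem.Set.add st.2 c.2.2)
  | none => st

def guess_mapping_py_alt (headers : List String) : List (String × String) :=
  let norm := headers.map (fun h => PySem.Str.strip (PySem.Str.lower h))
  (pvGuessPatterns.foldl (pvBStep headers norm) (PySem.Dict.empty, PySem.Set.empty)).1.items

-- ===== PRECONDITION & SPEC =====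
def Spec_guess_mapping_py (headers : List String) (out : List (String × String)) : Prop := out = guess_mapping_py_alt headers
instance (headers : List String) (out : List (String × String)) : Decidable (Spec_guess_mapping_py headers out) := by unfold Spec_guess_mapping_py; infer_instance

-- ===== CLAIM (what is proved, stated in full; the proofs are below) =====
def Claim_equal_guess_mapping_py : Prop := ∀ (headers : List String), Dom_guess_mapping_py headers → Spec_guess_mapping_py headers (guess_mapping_py headers)

-- ===== LEMMAS AND PROOFS =====

-- B's candidate list with an arbitrary enumeration start (for the induction).
def pvCandsFrom (used : PySem.Set String) (pats : List String) (s : Int)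
    (hs : List String) : List (Int × Int × String) :=
  ((PySem.List.enumerate (hs.zip (hs.map (fun h => PySem.Str.strip (PySem.Str.lower h)))) s).filter
      (fun e => !(e.2.1 == "") && !(PySem.Set.contains used e.2.1)
        && pats.any (fun p => PySem.Str.isIn p e.2.2))).map
    (fun e => ((if pats.contains e.2.2 then (0 : Int) else 1), e.1, e.2.1))

theorem pvCandsFrom_eq_cands (used : PySem.Set String) (pats : List String)
    (headers : List String) :
    pvBCands used pats headers (headers.map (fun h => PySem.Str.strip (PySem.Str.lower h)))
      = pvCandsFrom used pats 0 headers := rfl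

-- the folding step inside PySem.List.min2? at our keys, as a named function
def pvMinStep (acc : Option (Int × Int × String)) (x : Int × Int × String) :
    Option (Int × Int × String) :=
  match acc with
  | none => some x
  | some m =>
    if (decide (x.1 < m.1) || !decide (m.1 < x.1) && decide (x.2.1 < m.2.1)) = true
    then some x else some m

-- min2? of a (score, position, payload) list whose scores are 0/1 and whose positions strictly
-- increase: the first score-0 entry if any, else the head.
theorem pvMin2Aux (t : List (Int × Int × String)) :
    ∀ m : Int × Int × String, (∀ c ∈ t, c.1 = 0 ∨ c.1 = 1) → (m.1 = 0 ∨ m.1 = 1) →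
    (∀ c ∈ t, m.2.1 < c.2.1) → t.Pairwise (fun a b => a.2.1 < b.2.1) →
    t.foldl pvMinStep (some m)
      = if m.1 = 0 then some m
        else match t.find? (fun c => c.1 == 0) with
             | some c => some c | none => some m := by
  induction t with
  | nil => intro m _ _ _ _; simp [List.find?]
  | cons x t ih =>
    intro m hsc hm hlt hpw
    have hxlt : ¬ x.2.1 < m.2.1 := by have := hlt x (by simp); omega
    have hspw := (List.pairwise_cons.mp hpw)
    have hx01 := hsc x (by simp)
    rcases hm with hm0 | hm1
    · -- m has score 0: never replaced
      have hnx : ¬ x.1 < m.1 := by rcases hx01 with h | h <;> omega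
      simp only [List.foldl_cons]
      have hkeep : pvMinStep (some m) x = some m := by
        simp [pvMinStep, hnx, hxlt]
      rw [hkeep, ih m (fun c hc => hsc c (by simp [hc])) (Or.inl hm0)
        (fun c hc => hlt c (by simp [hc])) hspw.2]
      simp [hm0]
    · rcases hx01 with hx0 | hx1
      · -- m score 1, x score 0: replace, then x sticks
        simp only [List.foldl_cons]
        have hrep : pvMinStep (some m) x = some x := by simp [pvMinStep, hm1, hx0]
        rw [hrep, ih x (fun c hc => hsc c (by simp [hc])) (Or.inl hx0) hspw.1 hspw.2]
        simp [hx0, hm1]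
      · -- both score 1: keep m, x is not found later either
        simp only [List.foldl_cons]
        have hkeep : pvMinStep (some m) x = some m := by simp [pvMinStep, hm1, hx1, hxlt]
        rw [hkeep, ih m (fun c hc => hsc c (by simp [hc])) (Or.inr hm1)
          (fun c hc => hlt c (by simp [hc])) hspw.2]
        simp [hm1, hx1]

theorem pvMin2Binary (l : List (Int × Int × String))
    (hsc : ∀ c ∈ l, c.1 = 0 ∨ c.1 = 1) (hpw : l.Pairwise (fun a b => a.2.1 < b.2.1)) :
    PySem.List.min2? l (·.1) (·.2.1)
      = match l.find? (fun c => c.1 == 0) with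
        | some c => some c | none => l.head? := by
  cases l with
  | nil => rfl
  | cons x t =>
    have hpc := List.pairwise_cons.mp hpw
    have hx01 := hsc x (by simp)
    have hdef : PySem.List.min2? (x :: t) (·.1) (·.2.1) = (x :: t).foldl pvMinStep none := by
      unfold PySem.List.min2?
      congr 1
      funext acc y
      cases acc <;> rfl
    rw [hdef]
    simp only [List.foldl_cons]
    rw [show pvMinStep none x = some x from rfl]
    rw [pvMin2Aux t x (fun c hc => hsc c (by simp [hc])) hx01 hpc.1 hpc.2]
    rcases hx01 with h0 | h1
    · simp [h0]
    · rcases hfind : t.find? (fun c => c.1 == 0) with _ | c <;>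
        simp [h1, hfind]

-- structural facts about pvCandsFrom
theorem pvCandsFrom_scores (used : PySem.Set String) (pats : List String) (s : Int)
    (hs : List String) : ∀ c ∈ pvCandsFrom used pats s hs, c.1 = 0 ∨ c.1 = 1 := by
  intro c hc
  unfold pvCandsFrom at hc
  rcases List.mem_map.mp hc with ⟨e, _, rfl⟩
  by_cases h : PySem.Str.strip (PySem.Str.lower e.2.1) ∈ pats
  all_goals by_cases h2 : e.2.2 ∈ pats <;> simp [h2]

theorem pvCandsFrom_pairwise (used : PySem.Set String) (pats : List String) (s : Int)
    (hs : List String) :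
    (pvCandsFrom used pats s hs).Pairwise (fun a b => a.2.1 < b.2.1) := by
  unfold pvCandsFrom
  apply List.Pairwise.map
  · intro a b h; exact h
  · exact (PySem.List.pairwise_lt_enumerate _ _).sublist List.filter_sublist

-- one step of pvCandsFrom
theorem pvCandsFrom_cons (used : PySem.Set String) (pats : List String) (s : Int)
    (h : String) (t : List String) :
    pvCandsFrom used pats s (h :: t)
      = (if !(h == "") && !(PySem.Set.contains used h)
            && pats.any (fun p => PySem.Str.isIn p (PySem.Str.strip (PySem.Str.lower h)))
         then [((if pats.contains (PySem.Str.strip (PySem.Str.lower h)) then (0:Int) else 1), s, h)]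
         else [])
        ++ pvCandsFrom used pats (s + 1) t := by
  unfold pvCandsFrom
  simp only [List.map_cons, List.zip_cons_cons, PySem.List.enumerate_cons, List.filter_cons]
  by_cases hc : (!(h == "") && !(PySem.Set.contains used h)
      && pats.any (fun p => PySem.Str.isIn p (PySem.Str.strip (PySem.Str.lower h)))) = true
  · rw [if_pos hc, if_pos hc]
    rfl
  · rw [if_neg hc, if_neg hc]
    rfl

-- A's exact scan = first score-0 candidate.
theorem pvScanExact_eq_find (used : PySem.Set String) (pats : List String) :
    ∀ (hs : List String) (s : Int),
      ((pvCandsFrom used pats s hs).find? (fun c => c.1 == 0)).map (·.2.2)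
        = pvAScanExact used pats hs := by
  intro hs
  induction hs with
  | nil => intro s; rfl
  | cons h t ih =>
    intro s
    rw [pvCandsFrom_cons]
    simp only [pvAScanExact]
    by_cases hsk : h ∈ used ∨ h = ""
    · simp only [PySem.Set.contains, pysem]
      rcases hsk with hu | he
      · simp [hu, ih (s + 1)]
      · simp [he, ih (s + 1)]
    · push Not at hsk
      obtain ⟨hnu, hne⟩ := hsk
      by_cases hex : PySem.Str.strip (PySem.Str.lower h) ∈ pats
      · have hself : PySem.Str.isIn (PySem.Str.strip (PySem.Str.lower h))
            (PySem.Str.strip (PySem.Str.lower h)) = true := by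
          rw [PySem.Str.isIn_iff_infix]
        have hsubx : ∃ x ∈ pats, PySem.Chars.isIn x.toList
            (PySem.Chars.strip (PySem.Chars.lower h.toList)) = true :=
          ⟨_, hex, by simpa using hself⟩
        simp only [PySem.Set.contains, pysem]
        simp [hnu, hne, hex, hsubx]
      · by_cases hsub : ∃ x ∈ pats, PySem.Chars.isIn x.toList
            (PySem.Chars.strip (PySem.Chars.lower h.toList)) = true
        · simp only [PySem.Set.contains, pysem]
          simp [hnu, hne, hex, hsub, ih (s + 1)]
        · simp only [PySem.Set.contains, pysem]
          simp [hnu, hne, hex, hsub, ih (s + 1)]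

-- A's substring scan = first candidate.
theorem pvScanSub_eq_head (used : PySem.Set String) (pats : List String) :
    ∀ (hs : List String) (s : Int),
      (pvCandsFrom used pats s hs).head?.map (·.2.2) = pvAScanSub used pats hs := by
  intro hs
  induction hs with
  | nil => intro s; rfl
  | cons h t ih =>
    intro s
    rw [pvCandsFrom_cons]
    simp only [pvAScanSub]
    by_cases hsk : h ∈ used ∨ h = ""
    · simp only [PySem.Set.contains, pysem]
      rcases hsk with hu | he
      · simp [hu, ih (s + 1)]
      · simp [he, ih (s + 1)]
    · push Not at hsk
      obtain ⟨hnu, hne⟩ := hsk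
      by_cases hsub : ∃ x ∈ pats, PySem.Chars.isIn x.toList
          (PySem.Chars.strip (PySem.Chars.lower h.toList)) = true
      · simp only [PySem.Set.contains, pysem]
        simp [hnu, hne, hsub]
      · simp only [PySem.Set.contains, pysem]
        simp [hnu, hne, hsub, ih (s + 1)]

-- the per-field choice of the two programs agrees
theorem pvBest_eq (used : PySem.Set String) (pats : List String) (headers : List String) :
    (PySem.List.min2? (pvBCands used pats headers
        (headers.map (fun h => PySem.Str.strip (PySem.Str.lower h)))) (·.1) (·.2.1)).map (·.2.2)
      = match pvAScanExact used pats headers with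
        | some b => some b
        | none => pvAScanSub used pats headers := by
  rw [pvCandsFrom_eq_cands,
    pvMin2Binary _ (pvCandsFrom_scores used pats 0 headers) (pvCandsFrom_pairwise used pats 0 headers)]
  cases hfe : (pvCandsFrom used pats 0 headers).find? (fun c => c.1 == 0) with
  | some c =>
    have hx := pvScanExact_eq_find used pats headers 0
    rw [hfe] at hx
    simp only [Option.map_some] at hx
    simp [← hx]
  | none =>
    have hx := pvScanExact_eq_find used pats headers 0
    rw [hfe] at hx
    simp only [Option.map_none] at hx
    rw [← pvScanSub_eq_head used pats headers 0]
    simp [← hx]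

theorem pvStep_eq (headers : List String) :
    pvBStep headers (headers.map (fun h => PySem.Str.strip (PySem.Str.lower h)))
      = pvAStep headers := by
  funext st fp
  have hb := pvBest_eq st.2 fp.2 headers
  unfold pvBStep pvAStep
  cases hm : PySem.List.min2? (pvBCands st.2 fp.2 headers
      (headers.map (fun h => PySem.Str.strip (PySem.Str.lower h)))) (·.1) (·.2.1) with
  | some c =>
    rw [hm] at hb
    simp only [Option.map_some] at hb
    simp [← hb]
  | none =>
    rw [hm] at hb
    simp only [Option.map_none] at hb
    simp [← hb]

-- ===== VERDICT (by name: the statement is the Claim_ definition above) =====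
theorem guess_mapping_py_spec : Claim_equal_guess_mapping_py := by
  intro headers _
  unfold Spec_guess_mapping_py
  rw [show guess_mapping_py_alt headers
      = (pvGuessPatterns.foldl (pvBStep headers
          (headers.map (fun h => PySem.Str.strip (PySem.Str.lower h))))
        (PySem.Dict.empty, PySem.Set.empty)).1.items from rfl,
    pvStep_eq]
  rfl
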